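-- pv_equiv track=rewrite | github.com/MadhushankaSkrypton/Network-Programming | COHDCN181F007_xxd.py | func
-- ===== SOURCE A (Python) =====
-- def func(text):
--         string=""
--         for i in str(text):
--                 h=str(hex(ord(i)))[2::]
--                 if len(h)==1:
--                         h="0"+h
--                 string+=h
--         count=0
--         string2=""
--         for j in str(string):
--                 count+=1
--                 string2+=j
--                 if count%4==0:
--                         string2+=" "
--         return string2
-- ===== SOURCE B (Python) =====
-- def func(text):
--     s = ''.join(format(ord(c), '02x') for c in str(text))
--     parts = []
--     while len(s) >= 4:
--         parts.append(s[:4] + ' ')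
--         s = s[4:]
--     parts.append(s)
--     return ''.join(parts)
-- ===== Notes on version B (the rewrite author's own statement) =====
-- stated objective: simpler
-- what changed: B builds the flat hex string in one join of zero-padded two-digit hex codes and replaces A's counter-based char-by-char spacing loop with slicing a four-char chunk plus a space off the front while four chars remain.
import Mathlib
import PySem

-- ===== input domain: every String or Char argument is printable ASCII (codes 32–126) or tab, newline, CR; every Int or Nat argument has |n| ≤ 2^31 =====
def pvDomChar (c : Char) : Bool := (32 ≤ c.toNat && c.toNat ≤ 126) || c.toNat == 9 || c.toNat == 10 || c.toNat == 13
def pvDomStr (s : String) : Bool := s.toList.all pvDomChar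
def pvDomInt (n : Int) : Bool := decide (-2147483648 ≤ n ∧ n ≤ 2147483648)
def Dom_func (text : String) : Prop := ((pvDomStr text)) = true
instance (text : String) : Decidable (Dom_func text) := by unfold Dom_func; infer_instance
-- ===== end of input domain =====

-- B replaces the counter-based char-by-char spacing loop with slicing 4-char chunks off at a time (simpler, same cost).

-- shared base: the hex digit string of a nonnegative number, as Python's hex()/format 'x' produce it
def hexDigitChar (n : Nat) : Char := if n < 10 then Char.ofNat (48 + n) else Char.ofNat (87 + n)

def hexDigits (n : Nat) : List Char :=
  if n < 16 then [hexDigitChar n]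
  else hexDigits (n / 16) ++ [hexDigitChar (n % 16)]

-- ===== PORT A =====
-- one step of A's spacing loop: count += 1; string2 += j; if count % 4 == 0: string2 += " "
def stepF (st : Int × List Char) (j : Char) : Int × List Char :=
  let count := st.1 + 1
  let s2 := st.2 ++ [j]
  if count % 4 == 0 then (count, s2 ++ [' ']) else (count, s2)

def func (text : String) : String :=
  let string : List Char := text.toList.foldl (fun acc i =>
    let h := hexDigits i.toNat              -- str(hex(ord(i)))[2::]
    let h := if h.length = 1 then '0' :: h else h
    acc ++ h) []
  let st := string.foldl stepF (0, [])
  String.ofList st.2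

-- ===== PORT B =====
-- format(ord(c), '02x'): pad the hex digits on the left with '0' to width 2
def padHex2 (h : List Char) : List Char := List.replicate (2 - h.length) '0' ++ h

-- the while loop: slice a 4-char chunk + ' ' off the front while len ≥ 4, then the tail
def chunk4 : List Char → List Char
  | a :: b :: c :: d :: rest => a :: b :: c :: d :: ' ' :: chunk4 rest
  | rest => rest

def func_alt (text : String) : String :=
  let s : List Char := (text.toList.map (fun c => padHex2 (hexDigits c.toNat))).flatten
  String.ofList (chunk4 s)

-- ===== PRECONDITION & SPEC =====
def Spec_func (text : String) (out : String) : Prop := out = func_alt text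
instance (text : String) (out : String) : Decidable (Spec_func text out) := by unfold Spec_func; infer_instance

-- ===== CLAIM (what is proved, stated in full; the proofs are below) =====
def Claim_equal_func : Prop := ∀ (text : String), Dom_func text → Spec_func text (func text)

-- ===== LEMMAS AND PROOFS =====

theorem hexDigits_ne_nil (n : Nat) : hexDigits n ≠ [] := by
  unfold hexDigits
  split
  · simp
  · simp

theorem pad_eq (n : Nat) :
    (if (hexDigits n).length = 1 then '0' :: hexDigits n else hexDigits n) = padHex2 (hexDigits n) := by
  have h := hexDigits_ne_nil n
  unfold padHex2
  cases hl : hexDigits n with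
  | nil => exact absurd hl h
  | cons a t =>
    cases t with
    | nil => simp
    | cons b t' => simp

theorem foldl_append_f {α β : Type} (f : α → List β) :
    ∀ (l : List α) (acc : List β),
      l.foldl (fun acc i => acc ++ f i) acc = acc ++ (l.map f).flatten := by
  intro l
  induction l with
  | nil => simp
  | cons a t ih => intro acc; simp [List.foldl, ih, List.append_assoc]

theorem stepF_no (st : Int × List Char) (j : Char) (h : (st.1 + 1) % 4 ≠ 0) :
    stepF st j = (st.1 + 1, st.2 ++ [j]) := by
  simp [stepF, h]

theorem stepF_yes (st : Int × List Char) (j : Char) (h : (st.1 + 1) % 4 = 0) :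
    stepF st j = (st.1 + 1, st.2 ++ [j] ++ [' ']) := by
  simp [stepF, h]

-- A's spacing loop, started at a counter divisible by 4, produces chunk4
theorem loop_eq_chunk4 :
    ∀ (s : List Char) (count : Int) (acc : List Char), count % 4 = 0 →
      (s.foldl stepF (count, acc)).2 = acc ++ chunk4 s := by
  intro s
  induction s using chunk4.induct with
  | case1 a b c d rest ih =>
    intro count acc hc
    rw [List.foldl_cons, stepF_no _ _ (by simp; omega),
        List.foldl_cons, stepF_no _ _ (by simp; omega),
        List.foldl_cons, stepF_no _ _ (by simp; omega),
        List.foldl_cons, stepF_yes _ _ (by simp; omega),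
        ih _ _ (by simp; omega)]
    simp [chunk4]
  | case2 rest hne =>
    intro count acc hc
    match rest, hne with
    | [], _ => simp [chunk4]
    | [a], _ =>
      rw [List.foldl_cons, stepF_no _ _ (by simp; omega)]
      simp [chunk4]
    | [a, b], _ =>
      rw [List.foldl_cons, stepF_no _ _ (by simp; omega),
          List.foldl_cons, stepF_no _ _ (by simp; omega)]
      simp [chunk4]
    | [a, b, c], _ =>
      rw [List.foldl_cons, stepF_no _ _ (by simp; omega),
          List.foldl_cons, stepF_no _ _ (by simp; omega),
          List.foldl_cons, stepF_no _ _ (by simp; omega)]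
      simp [chunk4]
    | a :: b :: c :: d :: r, hne => exact absurd rfl (hne a b c d r)

-- ===== VERDICT (by name: the statement is the Claim_ definition above) =====
theorem func_spec : Claim_equal_func := by
  intro text _
  unfold Spec_func func func_alt
  have hfun : (fun (acc : List Char) (i : Char) =>
      let h := hexDigits i.toNat
      let h := if h.length = 1 then '0' :: h else h
      acc ++ h)
      = (fun acc i => acc ++ padHex2 (hexDigits i.toNat)) := by
    funext acc i
    simp only
    rw [pad_eq]
  simp only [hfun, foldl_append_f, List.nil_append]
  rw [loop_eq_chunk4 _ 0 [] (by decide)]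
  simp
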